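-- pv_equiv track=rewrite | github.com/hoangduy181/ioai-assigntments | 1912924_1916022.py | getBoxPos
-- ===== SOURCE A (Python) =====
-- def getBoxPos(map):                       # lấy danh sách vị trí các hộp trên map
--     posList = []
--     for j,row in enumerate(map):
--         for i,col in enumerate(row):
--             if map[j][i] == "*" or map[j][i] == "$":
--                 posList.append((i,j))
--     posList.sort()
--     return posList
-- ===== SOURCE B (Python) =====
-- def getBoxPos(map):
--     # column-major scan: (i, j) pairs come out already in sorted order, no sort needed
--     width = max((len(row) for row in map), default=0)
--     posList = []
--     for i in range(width):
--         for j in range(len(map)):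
--             row = map[j]
--             if i < len(row) and (row[i] == "*" or row[i] == "$"):
--                 posList.append((i, j))
--     return posList
-- ===== Notes on version B (the rewrite author's own statement) =====
-- stated objective: alternative
-- what changed: B scans the grid column-major (outer loop over column index up to the maximum row width, inner over rows), so the (i,j) pairs are emitted already in sorted order and the explicit sort disappears.
import Mathlib
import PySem

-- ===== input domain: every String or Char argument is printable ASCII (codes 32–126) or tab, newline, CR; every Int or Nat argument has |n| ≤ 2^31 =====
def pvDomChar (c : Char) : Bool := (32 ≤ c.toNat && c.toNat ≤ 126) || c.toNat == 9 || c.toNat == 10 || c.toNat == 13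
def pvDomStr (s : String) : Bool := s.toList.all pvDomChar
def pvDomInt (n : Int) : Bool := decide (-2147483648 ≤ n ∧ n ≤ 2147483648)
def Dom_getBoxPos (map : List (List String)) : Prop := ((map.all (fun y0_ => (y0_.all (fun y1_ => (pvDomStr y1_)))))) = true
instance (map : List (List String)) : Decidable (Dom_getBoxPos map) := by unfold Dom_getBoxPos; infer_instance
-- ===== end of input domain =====

-- B replaces row-major collect + sort by a column-major scan that emits the pairs already sorted (alternative decomposition, no sort).

-- ===== PORT A =====
-- map[j][i] with j,i coming from enumerate is exactly the enumerated element col (ic.2): the access is always in range;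
-- the local posList is inlined into the sort call.
def getBoxPos (map : List (List String)) : List (Int × Int) :=
  PySem.List.sorted2
    ((PySem.List.enumerate map).foldl (fun acc jr =>
      (PySem.List.enumerate jr.2).foldl (fun acc2 ic =>
        if ic.2 == "*" || ic.2 == "$" then acc2 ++ [(ic.1, jr.1)] else acc2) acc) [])
    Prod.fst Prod.snd

-- ===== PORT B =====
-- width = max(len(row) for row in map, default=0); the locals width and row are inlined.
def getBoxPos_alt (map : List (List String)) : List (Int × Int) :=
  (List.range ((map.map List.length).foldl max 0)).foldl (fun acc i =>
    (List.range map.length).foldl (fun acc2 j =>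
      if decide (i < (map.getD j []).length) &&
         ((map.getD j []).getD i "" == "*" || (map.getD j []).getD i "" == "$")
      then acc2 ++ [(Int.ofNat i, Int.ofNat j)] else acc2) acc) []

-- ===== PRECONDITION & SPEC =====
def Spec_getBoxPos (map : List (List String)) (out : List (Int × Int)) : Prop := out = getBoxPos_alt map
instance (map : List (List String)) (out : List (Int × Int)) : Decidable (Spec_getBoxPos map out) := by unfold Spec_getBoxPos; infer_instance

-- ===== CLAIM (what is proved, stated in full; the proofs are below) =====
def Claim_equal_getBoxPos : Prop := ∀ (map : List (List String)), Dom_getBoxPos map → Spec_getBoxPos map (getBoxPos map)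

-- ===== LEMMAS AND PROOFS =====

def pvHit (s : String) : Bool := s == "*" || s == "$"

-- A's raw (unsorted) list in flatMap form
def pvARaw (map : List (List String)) : List (Int × Int) :=
  (PySem.List.enumerate map).flatMap (fun jr =>
    ((PySem.List.enumerate jr.2).filter (fun ic => pvHit ic.2)).map (fun ic => (ic.1, jr.1)))

-- B's list in flatMap form
def pvBList (map : List (List String)) : List (Int × Int) :=
  (List.range ((map.map List.length).foldl max 0)).flatMap (fun i =>
    ((List.range map.length).filter (fun j =>
      decide (i < (map.getD j []).length) && pvHit ((map.getD j []).getD i ""))).map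
      (fun j => (Int.ofNat i, Int.ofNat j)))

lemma pvA_eq (map : List (List String)) :
    getBoxPos map = PySem.List.sorted2 (pvARaw map) Prod.fst Prod.snd := by
  have h1 : ∀ (jr : Int × List String) (acc : List (Int × Int)),
      (PySem.List.enumerate jr.2).foldl (fun acc2 ic =>
        if ic.2 == "*" || ic.2 == "$" then acc2 ++ [(ic.1, jr.1)] else acc2) acc
      = acc ++ ((PySem.List.enumerate jr.2).filter (fun ic => pvHit ic.2)).map
          (fun ic => (ic.1, jr.1)) := by
    intro jr acc
    exact PySem.List.foldl_append_if (fun (ic : Int × String) => pvHit ic.2)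
      (fun (ic : Int × String) => (ic.1, jr.1)) _ acc
  unfold getBoxPos pvARaw
  simp only [pvHit] at h1 ⊢
  rw [show (fun (acc : List (Int × Int)) (jr : Int × List String) =>
      (PySem.List.enumerate jr.2).foldl (fun acc2 ic =>
        if ic.2 == "*" || ic.2 == "$" then acc2 ++ [(ic.1, jr.1)] else acc2) acc)
    = (fun (acc : List (Int × Int)) (jr : Int × List String) => acc ++ ((PySem.List.enumerate jr.2).filter
        (fun (ic : Int × String) => ic.2 == "*" || ic.2 == "$")).map (fun ic => (ic.1, jr.1))) from
      funext fun acc => funext fun jr => h1 jr acc]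
  rw [PySem.List.foldl_append_eq_flatMap]
  simp

lemma pvB_eq (map : List (List String)) : getBoxPos_alt map = pvBList map := by
  have h1 : ∀ (i : Nat) (acc : List (Int × Int)),
      (List.range map.length).foldl (fun acc2 j =>
        if decide (i < (map.getD j []).length) &&
           ((map.getD j []).getD i "" == "*" || (map.getD j []).getD i "" == "$")
        then acc2 ++ [(Int.ofNat i, Int.ofNat j)] else acc2) acc
      = acc ++ ((List.range map.length).filter (fun j =>
          decide (i < (map.getD j []).length) && pvHit ((map.getD j []).getD i ""))).map
          (fun j => (Int.ofNat i, Int.ofNat j)) := by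
    intro i acc
    exact PySem.List.foldl_append_if
      (fun j => decide (i < (map.getD j []).length) && pvHit ((map.getD j []).getD i ""))
      (fun j => (Int.ofNat i, Int.ofNat j)) _ acc
  unfold getBoxPos_alt pvBList
  simp only [pvHit] at h1 ⊢
  rw [show (fun (acc : List (Int × Int)) (i : Nat) =>
      (List.range map.length).foldl (fun acc2 j =>
        if decide (i < (map.getD j []).length) &&
           ((map.getD j []).getD i "" == "*" || (map.getD j []).getD i "" == "$")
        then acc2 ++ [(Int.ofNat i, Int.ofNat j)] else acc2) acc)
    = (fun acc i => acc ++ ((List.range map.length).filter (fun j =>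
        decide (i < (map.getD j []).length) &&
          ((map.getD j []).getD i "" == "*" || (map.getD j []).getD i "" == "$"))).map
        (fun j => (Int.ofNat i, Int.ofNat j))) from
      funext fun acc => funext fun i => h1 i acc]
  rw [PySem.List.foldl_append_eq_flatMap]
  simp

-- python tuple sort = sort by the lexicographic key
lemma pv_sorted2_eq_sorted_lex (xs : List (Int × Int)) :
    PySem.List.sorted2 xs Prod.fst Prod.snd = PySem.List.sorted xs (fun p => toLex p) := by
  rw [PySem.List.sorted_eq_foldl_insertBy]
  unfold PySem.List.sorted2
  simp only
  congr 1
  funext acc x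
  congr 1
  funext a b
  by_cases h1 : a.1 < b.1 <;> by_cases h2 : b.1 < a.1 <;> by_cases h3 : a.2 < b.2 <;>
    simp [h1, h2, h3, Prod.Lex.lt_iff] <;> omega

lemma pv_foldl_max_init (t : List Nat) (c : Nat) : c ≤ t.foldl max c := by
  induction t generalizing c with
  | nil => simp
  | cons y s ih => exact le_trans (Nat.le_max_left c y) (ih _)

lemma pv_le_foldl_max (l : List Nat) (a b : Nat) (h : a ∈ l) : a ≤ l.foldl max b := by
  induction l generalizing b with
  | nil => simp at h
  | cons x t ih =>
    rcases List.mem_cons.mp h with rfl | hmem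
    · exact le_trans (Nat.le_max_right b a) (pv_foldl_max_init t _)
    · exact ih _ hmem

lemma pv_len_le_width (map : List (List String)) {j : Nat} (hj : j < map.length) :
    map[j].length ≤ (map.map List.length).foldl max 0 :=
  pv_le_foldl_max _ _ _ (List.mem_map.mpr ⟨map[j], List.getElem_mem hj, rfl⟩)

lemma pv_mem_A (map : List (List String)) (p : Int × Int) :
    p ∈ pvARaw map ↔ ∃ j : Nat, ∃ hj : j < map.length, ∃ i : Nat, ∃ hi : i < map[j].length,
      pvHit map[j][i] = true ∧ p = (Int.ofNat i, Int.ofNat j) := by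
  unfold pvARaw
  simp only [List.mem_flatMap, List.mem_map, List.mem_filter, PySem.List.mem_enumerate_iff]
  constructor
  · rintro ⟨jr, ⟨j, hj, rfl⟩, ic, ⟨⟨i, hi, rfl⟩, hhit⟩, rfl⟩
    exact ⟨j, hj, i, hi, hhit, by simp [Int.ofNat_eq_natCast]⟩
  · rintro ⟨j, hj, i, hi, hhit, rfl⟩
    exact ⟨((j : Int), map[j]), ⟨j, hj, by simp⟩,
      ⟨((i : Int), map[j][i]), ⟨⟨i, hi, by simp⟩, hhit⟩, by simp [Int.ofNat_eq_natCast]⟩⟩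

lemma pv_mem_B (map : List (List String)) (p : Int × Int) :
    p ∈ pvBList map ↔ ∃ j : Nat, ∃ hj : j < map.length, ∃ i : Nat, ∃ hi : i < map[j].length,
      pvHit map[j][i] = true ∧ p = (Int.ofNat i, Int.ofNat j) := by
  unfold pvBList
  simp only [List.mem_flatMap, List.mem_map, List.mem_filter, List.mem_range]
  constructor
  · rintro ⟨i, hiw, j, ⟨hj, hcond⟩, rfl⟩
    rw [List.getD_eq_getElem map [] hj] at hcond
    have hi : i < map[j].length := by
      have := Bool.and_elim_left hcond
      simpa using this
    refine ⟨j, hj, i, hi, ?_, rfl⟩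
    have h2 := Bool.and_elim_right hcond
    rwa [List.getD_eq_getElem map[j] "" hi] at h2
  · rintro ⟨j, hj, i, hi, hhit, rfl⟩
    refine ⟨i, lt_of_lt_of_le hi (pv_len_le_width map hj), j, ⟨hj, ?_⟩, rfl⟩
    rw [List.getD_eq_getElem map [] hj, List.getD_eq_getElem map[j] "" hi]
    simp [hi, hhit]

lemma pv_pairwise_B (map : List (List String)) :
    (pvBList map).Pairwise (fun a b => (toLex a : Lex (Int × Int)) < toLex b) := by
  unfold pvBList
  rw [List.pairwise_flatMap]
  constructor
  · intro i _
    rw [List.pairwise_map]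
    have h := List.Pairwise.filter
      (fun j => decide (i < (map.getD j []).length) && pvHit ((map.getD j []).getD i ""))
      (List.pairwise_lt_range (n := map.length))
    refine h.imp ?_
    intro j1 j2 hlt
    simp [Prod.Lex.lt_iff]
    omega
  · refine (List.pairwise_lt_range).imp ?_
    intro i1 i2 h x hx y hy
    rw [List.mem_map] at hx hy
    obtain ⟨j1, _, rfl⟩ := hx
    obtain ⟨j2, _, rfl⟩ := hy
    simp [Prod.Lex.lt_iff]
    omega

lemma pv_nodup_A (map : List (List String)) : (pvARaw map).Nodup := by
  have hp : (pvARaw map).Pairwise (fun a b => a.2 < b.2 ∨ (a.2 = b.2 ∧ a.1 < b.1)) := by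
    unfold pvARaw
    rw [List.pairwise_flatMap]
    constructor
    · intro jr _
      rw [List.pairwise_map]
      have h := List.Pairwise.filter (fun ic => pvHit ic.2)
        (PySem.List.pairwise_lt_enumerate jr.2 0)
      refine h.imp ?_
      intro a b hlt
      exact Or.inr ⟨rfl, hlt⟩
    · refine (PySem.List.pairwise_lt_enumerate map 0).imp ?_
      intro a b h x hx y hy
      rw [List.mem_map] at hx hy
      obtain ⟨ic1, _, rfl⟩ := hx
      obtain ⟨ic2, _, rfl⟩ := hy
      exact Or.inl h
  refine hp.imp ?_
  rintro a b (h | ⟨h1, h2⟩) <;> intro hab <;> subst hab <;> omega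

lemma pv_nodup_B (map : List (List String)) : (pvBList map).Nodup := by
  refine (pv_pairwise_B map).imp ?_
  intro a b h hab
  subst hab
  exact lt_irrefl _ h

lemma pv_perm (map : List (List String)) : (pvBList map).Perm (pvARaw map) := by
  rw [List.perm_ext_iff_of_nodup (pv_nodup_B map) (pv_nodup_A map)]
  intro p
  rw [pv_mem_A, pv_mem_B]

-- ===== VERDICT (by name: the statement is the Claim_ definition above) =====
theorem getBoxPos_spec : Claim_equal_getBoxPos := by
  intro map _
  unfold Spec_getBoxPos
  rw [pvA_eq, pvB_eq, pv_sorted2_eq_sorted_lex]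
  exact PySem.List.sorted_eq_of_perm_of_pairwise_lt _ _ _ (pv_perm map) (pv_pairwise_B map)
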